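-- pv_equiv track=rewrite | github.com/eu-digital-sovereignty/EUDiSoPr2026 | visualization/generate_tables.py | count_certificates
-- ===== SOURCE A (Python) =====
-- from collections import Counter
--
-- def apply_ca_override(issuer, country, overrides):
--     issuer_l = (issuer or "").lower()
--     for pattern, cc in overrides:
--         if pattern in issuer_l:
--             return cc
--     return country
--
-- def count_certificates(ssl_ok, overrides):
--     counter = Counter()
--     country_for = {}
--     for r in ssl_ok:
--         name = r.get("ssl_issuer_org")
--         if not name:
--             continue
--         counter[name] += 1
--         country_for.setdefault(
--             name, apply_ca_override(name, r.get("ssl_issuer_country"), overrides) or "—"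
--         )
--     return counter, country_for
-- ===== SOURCE B (Python) =====
-- from collections import Counter
--
-- def apply_ca_override(issuer, country, overrides):
--     issuer_l = (issuer or "").lower()
--     for pattern, cc in overrides:
--         if pattern in issuer_l:
--             return cc
--     return country
--
-- def count_certificates(ssl_ok, overrides):
--     # First pass: group the valid records by issuer org name, keeping order.
--     groups = {}
--     for r in ssl_ok:
--         name = r.get("ssl_issuer_org")
--         if name:
--             groups.setdefault(name, []).append(r)
--     # Derive both outputs from the groups: count = group size,
--     # country = first record's country (first-record-wins, like A).
--     counter = Counter({name: len(recs) for name, recs in groups.items()})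
--     country_for = {
--         name: apply_ca_override(name, recs[0].get("ssl_issuer_country"), overrides) or "—"
--         for name, recs in groups.items()
--     }
--     return counter, country_for
-- ===== Notes on version B (the rewrite author's own statement) =====
-- stated objective: alternative
-- what changed: B first groups the valid records into a dict name -> list of records in one pass, then derives the Counter (group sizes) and the country map (override applied to each group's first record) from the groups, instead of maintaining both dicts record by record.
import Mathlib
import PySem

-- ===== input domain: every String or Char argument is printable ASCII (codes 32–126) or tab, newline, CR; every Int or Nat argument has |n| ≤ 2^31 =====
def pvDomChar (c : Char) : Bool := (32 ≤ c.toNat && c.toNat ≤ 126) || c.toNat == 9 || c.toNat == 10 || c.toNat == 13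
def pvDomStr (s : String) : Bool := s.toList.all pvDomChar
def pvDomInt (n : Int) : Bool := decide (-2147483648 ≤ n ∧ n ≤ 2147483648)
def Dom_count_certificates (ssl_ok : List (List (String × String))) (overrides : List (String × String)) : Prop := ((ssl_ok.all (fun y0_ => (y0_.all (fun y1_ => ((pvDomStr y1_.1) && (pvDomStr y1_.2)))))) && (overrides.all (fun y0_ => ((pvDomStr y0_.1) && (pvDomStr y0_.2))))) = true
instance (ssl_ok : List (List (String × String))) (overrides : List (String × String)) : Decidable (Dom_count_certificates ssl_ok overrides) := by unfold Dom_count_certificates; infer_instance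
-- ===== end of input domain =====

-- B groups the valid records by issuer name in one pass and then derives the
-- counter (group sizes) and the country map (from each group's first record),
-- instead of maintaining both dicts record by record as A does. Return-value
-- equivalence only (neither program mutates its arguments).

-- ===== PORT A =====
-- r.get(k) on the association-list encoding of a Python dict: first match.
def pvDictGet (k : String) : List (String × String) → Option String
  | [] => none
  | (k', v) :: rest => if k' == k then some v else pvDictGet k rest

-- the 'for pattern, cc in overrides' loop of apply_ca_override
def pvCaLoop (issuerL : String) (country : Option String) : List (String × String) → Option String
  | [] => country
  | (pat, cc) :: rest =>
      if PySem.Str.isIn pat issuerL then some cc else pvCaLoop issuerL country rest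

def apply_ca_override (issuer : String) (country : Option String)
    (overrides : List (String × String)) : Option String :=
  pvCaLoop (PySem.Str.lower issuer) country overrides

-- 'x or "—"' on an Optional[str]
def pvOrDash (o : Option String) : String :=
  match o with
  | some s => if s == "" then "—" else s
  | none => "—"

def count_certificates (ssl_ok : List (List (String × String))) (overrides : List (String × String)) : (List (String × Int)) × (List (String × String)) :=
  let st := ssl_ok.foldl
    (fun (st : PySem.Dict String Int × PySem.Dict String String) r =>
      match pvDictGet "ssl_issuer_org" r with
      | none => st
      | some name =>
        if name == "" then st
        else
          (st.1.modify name 0 (· + 1),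
           st.2.setdefault name
             (pvOrDash (apply_ca_override name (pvDictGet "ssl_issuer_country" r) overrides))))
    (PySem.Dict.empty, PySem.Dict.empty)
  (st.1.items, st.2.items)

-- ===== PORT B =====
def count_certificates_alt (ssl_ok : List (List (String × String))) (overrides : List (String × String)) : (List (String × Int)) × (List (String × String)) :=
  let groups : PySem.Dict String (List (List (String × String))) := ssl_ok.foldl
    (fun g r =>
      match pvDictGet "ssl_issuer_org" r with
      | none => g
      | some name => if name == "" then g else g.modify name [] (· ++ [r]))
    PySem.Dict.empty
  (groups.items.map (fun p => (p.1, (p.2.length : Int))),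
   groups.items.map (fun p =>
     (p.1, pvOrDash (apply_ca_override p.1
        (pvDictGet "ssl_issuer_country" (PySem.List.pyGetD p.2 0 [])) overrides))))

-- ===== PRECONDITION & SPEC =====
def Spec_count_certificates (ssl_ok : List (List (String × String))) (overrides : List (String × String)) (out : (List (String × Int)) × (List (String × String))) : Prop := out = count_certificates_alt ssl_ok overrides
instance (ssl_ok : List (List (String × String))) (overrides : List (String × String)) (out : (List (String × Int)) × (List (String × String))) : Decidable (Spec_count_certificates ssl_ok overrides out) := by unfold Spec_count_certificates; infer_instance

-- ===== CLAIM (what is proved, stated in full; the proofs are below) =====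
def Claim_equal_count_certificates : Prop := ∀ (ssl_ok : List (List (String × String))) (overrides : List (String × String)), Dom_count_certificates ssl_ok overrides → Spec_count_certificates ssl_ok overrides (count_certificates ssl_ok overrides)

-- ===== LEMMAS AND PROOFS =====

def pvVal (ov : List (String × String)) (n : String) (r : List (String × String)) : String :=
  pvOrDash (apply_ca_override n (pvDictGet "ssl_issuer_country" r) ov)

def pvFC (p : String × List (List (String × String))) : String × Int := (p.1, (p.2.length : Int))

def pvFK (ov : List (String × String)) (p : String × List (List (String × String))) : String × String :=
  (p.1, pvVal ov p.1 (PySem.List.pyGetD p.2 0 []))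

lemma pv_keys_of_items_map {ν : Type} (c : PySem.Dict String ν)
    (g : PySem.Dict String (List (List (String × String))))
    (f : String × List (List (String × String)) → String × ν)
    (hf : ∀ p, (f p).1 = p.1) (h : c.items = g.items.map f) : c.keys = g.keys := by
  simp only [PySem.Dict.keys, h, List.map_map]
  exact List.map_congr_left (fun p _ => hf p)

lemma pv_loop_inv (ov : List (String × String)) (l : List (List (String × String))) :
    ∀ (g : PySem.Dict String (List (List (String × String))))
      (c : PySem.Dict String Int) (cf : PySem.Dict String String),
      g.keys.Nodup →
      (∀ p ∈ g.items, p.2 ≠ []) →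
      c.items = g.items.map pvFC →
      cf.items = g.items.map (pvFK ov) →
      (l.foldl
        (fun (st : PySem.Dict String Int × PySem.Dict String String) r =>
          match pvDictGet "ssl_issuer_org" r with
          | none => st
          | some name =>
            if name == "" then st
            else (st.1.modify name 0 (· + 1),
                  st.2.setdefault name (pvVal ov name r))) (c, cf)).1.items
        = (l.foldl
            (fun g r =>
              match pvDictGet "ssl_issuer_org" r with
              | none => g
              | some name => if name == "" then g else g.modify name [] (· ++ [r])) g).items.map pvFC
      ∧ (l.foldl
          (fun (st : PySem.Dict String Int × PySem.Dict String String) r =>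
            match pvDictGet "ssl_issuer_org" r with
            | none => st
            | some name =>
              if name == "" then st
              else (st.1.modify name 0 (· + 1),
                    st.2.setdefault name (pvVal ov name r))) (c, cf)).2.items
          = (l.foldl
              (fun g r =>
                match pvDictGet "ssl_issuer_org" r with
                | none => g
                | some name => if name == "" then g else g.modify name [] (· ++ [r])) g).items.map (pvFK ov) := by
  induction l with
  | nil => intro g c cf _ _ hc hcf; exact ⟨hc, hcf⟩
  | cons r l ih =>
    intro g c cf hnd hne hc hcf
    simp only [List.foldl_cons]
    cases hval : pvDictGet "ssl_issuer_org" r with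
    | none => exact ih g c cf hnd hne hc hcf
    | some name =>
      by_cases hemp : name = ""
      · simp only [hemp, BEq.rfl, if_true]
        exact ih g c cf hnd hne hc hcf
      · have hbe : (name == "") = false := by simp [hemp]
        simp only [hbe, Bool.false_eq_true, if_false]
        have hkC : c.keys = g.keys := pv_keys_of_items_map c g pvFC (fun p => rfl) hc
        have hkK : cf.keys = g.keys := pv_keys_of_items_map cf g (pvFK ov) (fun p => rfl) hcf
        have hcontC : c.contains name = g.contains name := by
          rw [PySem.Dict.contains_eq_decide_mem_keys, PySem.Dict.contains_eq_decide_mem_keys, hkC]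
        have hcontK : cf.contains name = g.contains name := by
          rw [PySem.Dict.contains_eq_decide_mem_keys, PySem.Dict.contains_eq_decide_mem_keys, hkK]
        by_cases hg : g.contains name = true
        · -- name already grouped: both sides update the existing entry in place
          have hmemk : name ∈ g.keys := (PySem.Dict.contains_iff_mem_keys g name).mp hg
          have hex : ∃ x, (name, x) ∈ g.items := by simpa [PySem.Dict.keys] using hmemk
          obtain ⟨v0, hv0⟩ := hex
          have hgetg : g.getD name [] = v0 := PySem.Dict.getD_of_mem_items g hv0 hnd []
          have hndC : c.keys.Nodup := hkC ▸ hnd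
          have hgetc : c.getD name 0 = (v0.length : Int) := by
            refine PySem.Dict.getD_of_mem_items c (k := name) (v := (v0.length : Int)) ?_ hndC 0
            rw [hc]
            exact List.mem_map_of_mem hv0
          have hitg : (g.modify name [] (· ++ [r])).items
              = g.items.map (fun q => if q.1 == name then (name, g.getD name [] ++ [r]) else q) :=
            PySem.Dict.items_insert_of_contains g _ hg
          have hitc : (c.modify name 0 (· + 1)).items
              = c.items.map (fun q => if q.1 == name then (name, c.getD name 0 + 1) else q) :=
            PySem.Dict.items_insert_of_contains c _ (by rw [hcontC]; exact hg)
          have hcfeq : cf.setdefault name (pvVal ov name r) = cf :=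
            PySem.Dict.setdefault_of_contains cf _ (by rw [hcontK]; exact hg)
          have huniq : ∀ q ∈ g.items, q.1 = name → q.2 = v0 := by
            intro q hq hq1
            have h2 := PySem.Dict.getD_of_mem_items g (k := name) (v := q.2)
              (by rw [← hq1]; exact hq) hnd []
            rw [hgetg] at h2; exact h2.symm
          refine ih (g.modify name [] (· ++ [r])) (c.modify name 0 (· + 1))
            (cf.setdefault name (pvVal ov name r)) ?_ ?_ ?_ ?_
          · have hk := PySem.Dict.keys_insert_of_contains g (g.getD name [] ++ [r]) hg
            show (g.modify name [] (· ++ [r])).keys.Nodup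
            rw [PySem.Dict.modify, hk]; exact hnd
          · intro p hp
            rw [hitg] at hp
            obtain ⟨q, hq, hqe⟩ := List.exists_of_mem_map hp
            by_cases hq1 : q.1 = name
            · rw [if_pos (by simp [hq1])] at hqe
              rw [← hqe]; simp
            · rw [if_neg (by simp [hq1])] at hqe
              rw [← hqe]; exact hne q hq
          · rw [hitc, hitg, hc, List.map_map, List.map_map]
            refine List.map_congr_left ?_
            intro q hq
            by_cases hq1 : q.1 = name
            · have hv : q.2 = v0 := huniq q hq hq1
              simp [pvFC, hq1, hgetc, hgetg, hv]
            · simp [pvFC, hq1]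
          · rw [hcfeq, hcf, hitg, List.map_map]
            refine List.map_congr_left ?_
            intro q hq
            by_cases hq1 : q.1 = name
            · have hv : q.2 = v0 := huniq q hq hq1
              have hnev : q.2 ≠ [] := hne q hq
              simp only [Function.comp_apply, if_pos (by simp [hq1] : (q.1 == name) = true)]
              have hhead : PySem.List.pyGetD (g.getD name [] ++ [r]) 0 ([] : List (String × String))
                  = PySem.List.pyGetD q.2 0 [] := by
                obtain ⟨a, t, he⟩ := List.exists_cons_of_ne_nil hnev
                rw [hgetg, ← hv, he]
                simp [PySem.List.pyGetD_zero]
              simp [pvFK, hhead, hq1]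
            · simp [pvFK, hq1]
        · -- new name: both sides append a fresh entry
          have hgf : g.contains name = false := by simpa using hg
          have hitg : (g.modify name [] (· ++ [r])).items = g.items ++ [(name, [r])] := by
            rw [PySem.Dict.modify, PySem.Dict.getD_of_not_contains g [] hgf]
            simpa using PySem.Dict.items_insert_of_not_contains g ([] ++ [r]) hgf
          have hitc : (c.modify name 0 (· + 1)).items = c.items ++ [(name, 1)] := by
            have hcf0 : c.contains name = false := by rw [hcontC]; exact hgf
            rw [PySem.Dict.modify, PySem.Dict.getD_of_not_contains c 0 hcf0]
            simpa using PySem.Dict.items_insert_of_not_contains c ((0 : Int) + 1) hcf0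
          have hitk : (cf.setdefault name (pvVal ov name r)).items
              = cf.items ++ [(name, pvVal ov name r)] := by
            have hkf0 : cf.contains name = false := by rw [hcontK]; exact hgf
            rw [PySem.Dict.setdefault_of_not_contains cf _ hkf0]
            exact PySem.Dict.items_insert_of_not_contains cf _ hkf0
          refine ih (g.modify name [] (· ++ [r])) (c.modify name 0 (· + 1))
            (cf.setdefault name (pvVal ov name r)) ?_ ?_ ?_ ?_
          · have hk := PySem.Dict.keys_insert_of_not_contains g (g.getD name [] ++ [r]) hgf
            have hnm : name ∉ g.keys := fun hm => by
              rw [(PySem.Dict.contains_iff_mem_keys g name).mpr hm] at hgf; simp at hgf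
            show (g.modify name [] (· ++ [r])).keys.Nodup
            rw [PySem.Dict.modify, hk]
            rw [List.nodup_append]
            refine ⟨hnd, List.nodup_singleton _, ?_⟩
            intro a ha b hb
            rw [List.mem_singleton] at hb
            exact fun hab => hnm ((hab.trans hb) ▸ ha)
          · intro p hp
            rw [hitg] at hp
            rcases List.mem_append.mp hp with h | h
            · exact hne p h
            · simp only [List.mem_singleton] at h
              rw [h]; simp
          · rw [hitc, hitg, hc, List.map_append]
            simp [pvFC]
          · rw [hitk, hitg, hcf, List.map_append]
            simp [pvFK, PySem.List.pyGetD_zero]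

-- ===== VERDICT (by name: the statement is the Claim_ definition above) =====
theorem count_certificates_spec : Claim_equal_count_certificates := by
  intro ssl_ok overrides _
  unfold Spec_count_certificates count_certificates count_certificates_alt
  have h := pv_loop_inv overrides ssl_ok PySem.Dict.empty PySem.Dict.empty PySem.Dict.empty
    (by simp [PySem.Dict.keys, PySem.Dict.empty]) (by simp [PySem.Dict.empty])
    (by simp [PySem.Dict.empty]) (by simp [PySem.Dict.empty])
  exact Prod.ext h.1 h.2
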